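-- pv_equiv track=rewrite | github.com/alessandrofd/leetcode-python | 2141-maximum-running-time-of-n-computers.py | maxRunTime_bin_search
-- ===== SOURCE A (Python) =====
-- from typing import List
--
-- def maxRunTime_bin_search(n: int, batteries: List[int]) -> int:
--     """
--     A solução abaixo utiliza os mesmos conceitos da bateria sobressalente
--     aplicados na solução anterior. O detalhe relevante aqui é que ao calcular
--     a carga total (totalCharge) das baterias nós temos que descartar as cargas
--     das baterias que excedam o valor que arbitramos como possível resposta
--     (runningTime). runningTime não está restrito a qualquer carga individual já
--     que o número de baterias pode exceder o número de computadores.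
--     """
--     if n == len(batteries):
--         return min(batteries)
--
--     lo = 1
--     hi = (sum(batteries) // n) + 1
--     while lo < hi:
--         running_time = (lo + hi) // 2
--         charge = sum(min(running_time, c) for c in batteries) // n
--         if running_time <= charge:
--             lo = running_time + 1
--         else:
--             hi = running_time
--
--     return lo - 1
-- ===== SOURCE B (Python) =====
-- def maxRunTime_bin_search(n, batteries):
--     if n == len(batteries):
--         return min(batteries)
--
--     bs = sorted(batteries)
--     m = len(bs)
--     pref = [0]
--     s = 0
--     for c in bs:
--         s += c
--         pref.append(s)
--
--     def capped(t):
--         # sum(min(t, c) for c in bs), via prefix sums: find the first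
--         # index whose battery is >= t with a hand-rolled bisect_left.
--         lo, hi = 0, m
--         while lo < hi:
--             mid = (lo + hi) // 2
--             if bs[mid] < t:
--                 lo = mid + 1
--             else:
--                 hi = mid
--         return pref[lo] + t * (m - lo)
--
--     lo = 1
--     hi = s // n + 1
--     while lo < hi:
--         t = (lo + hi) // 2
--         if t <= capped(t) // n:
--             lo = t + 1
--         else:
--             hi = t
--     return lo - 1
-- ===== Notes on version B (the rewrite author's own statement) =====
-- stated objective: alternative
-- what changed: The per-step O(m) capped-sum scan inside the binary search over answers is replaced by sorting once, building prefix sums, and evaluating sum(min(t,c)) with a hand-rolled bisect on the sorted list.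
import Mathlib
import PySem

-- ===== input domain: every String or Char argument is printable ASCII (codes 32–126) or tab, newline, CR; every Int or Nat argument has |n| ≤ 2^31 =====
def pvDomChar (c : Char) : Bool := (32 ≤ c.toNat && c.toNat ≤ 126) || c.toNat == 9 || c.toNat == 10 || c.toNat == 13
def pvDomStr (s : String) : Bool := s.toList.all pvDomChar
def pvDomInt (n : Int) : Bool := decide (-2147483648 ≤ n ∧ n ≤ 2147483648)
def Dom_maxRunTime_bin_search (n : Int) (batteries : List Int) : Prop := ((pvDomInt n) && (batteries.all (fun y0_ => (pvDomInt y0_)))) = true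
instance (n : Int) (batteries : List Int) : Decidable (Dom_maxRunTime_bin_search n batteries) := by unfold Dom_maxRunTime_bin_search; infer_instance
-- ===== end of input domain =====

-- B replaces A's inner capped-sum scan by sort + prefix sums + a hand-rolled bisect,
-- a different evaluation of the same binary search over answers (return value proved equal).

-- ===== PORT A =====
-- midpoint bounds, used by both ports' termination proofs
theorem pvMidBounds (lo hi : Int) (h : lo < hi) :
    lo ≤ PySem.Int.floordiv (lo + hi) 2 ∧ PySem.Int.floordiv (lo + hi) 2 < hi := by
  constructor
  · exact (PySem.Int.le_floordiv_iff_mul_le (by omega)).mpr (by omega)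
  · exact (PySem.Int.floordiv_lt_iff_lt_mul (by omega)).mpr (by omega)

-- the `while lo < hi` loop of A; state is (lo, hi)
def pvLoopA (n : Int) (batteries : List Int) (lo hi : Int) : Int :=
  if h : lo < hi then
    let rt := PySem.Int.floordiv (lo + hi) 2
    let charge := PySem.Int.floordiv (batteries.foldl (fun a c => a + min rt c) 0) n
    if rt ≤ charge then pvLoopA n batteries (rt + 1) hi
    else pvLoopA n batteries lo rt
  else lo - 1
termination_by (hi - lo).toNat
decreasing_by
  · have := pvMidBounds lo hi h; omega
  · have := pvMidBounds lo hi h; omega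

def maxRunTime_bin_search (n : Int) (batteries : List Int) : Int :=
  if n = (batteries.length : Int) then
    (PySem.List.min? batteries (fun x => x)).getD 0  -- min([]) raises ValueError: excluded by Pre_
  else
    pvLoopA n batteries 1 (PySem.Int.floordiv (batteries.foldl (· + ·) 0) n + 1)

-- ===== PORT B =====
-- hand-rolled bisect_left of Source B; Python's lo/hi/mid stay in [0, len(bs)], so Nat
-- indices with Nat floor division `/ 2` are exact here
def pvBisect (bs : List Int) (t : Int) (lo hi : Nat) : Nat :=
  if _h : lo < hi then
    let mid := (lo + hi) / 2
    if bs.getD mid 0 < t then pvBisect bs t (mid + 1) hi  -- bs[mid]: mid < hi ≤ len(bs), in range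
    else pvBisect bs t lo mid
  else lo
termination_by hi - lo
decreasing_by all_goals omega

-- capped(t) of Source B: pref[i] + t * (m - i); both indexings are in range (i ≤ m)
def pvCapped (bs pref : List Int) (m : Nat) (t : Int) : Int :=
  let i := pvBisect bs t 0 m
  pref.getD i 0 + t * ((m : Int) - (i : Int))

-- B's outer `while lo < hi` loop
def pvLoopB (n : Int) (bs : List Int) (pref : List Int) (m : Nat) (lo hi : Int) : Int :=
  if h : lo < hi then
    let t := PySem.Int.floordiv (lo + hi) 2
    if t ≤ PySem.Int.floordiv (pvCapped bs pref m t) n then pvLoopB n bs pref m (t + 1) hi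
    else pvLoopB n bs pref m lo t
  else lo - 1
termination_by (hi - lo).toNat
decreasing_by
  · have := pvMidBounds lo hi h; omega
  · have := pvMidBounds lo hi h; omega

def maxRunTime_bin_search_alt (n : Int) (batteries : List Int) : Int :=
  if n = (batteries.length : Int) then
    (PySem.List.min? batteries (fun x => x)).getD 0  -- min([]) raises ValueError: excluded by Pre_
  else
    let bs := PySem.List.sorted batteries (fun x => x) false
    let m := bs.length
    -- `pref = [0]; s = 0; for c in bs: s += c; pref.append(s)`
    let sp := bs.foldl (fun (acc : Int × List Int) c => (acc.1 + c, acc.2 ++ [acc.1 + c])) (0, [0])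
    pvLoopB n bs sp.2 m 1 (PySem.Int.floordiv sp.1 n + 1)

-- ===== PRECONDITION & SPEC =====
-- Pre_ excludes exactly n = 0, the only inputs where Python A raises
-- (ZeroDivisionError at sum(batteries)//n, or ValueError from min([]) when batteries = []).
def Pre_maxRunTime_bin_search (n : Int) (batteries : List Int) : Prop := n ≠ 0
instance (n : Int) (batteries : List Int) : Decidable (Pre_maxRunTime_bin_search n batteries) := by
  unfold Pre_maxRunTime_bin_search; infer_instance

def pvWitness_maxRunTime_bin_search : Int × List Int := (2, [1, 10])

def Spec_maxRunTime_bin_search (n : Int) (batteries : List Int) (out : Int) : Prop := out = maxRunTime_bin_search_alt n batteries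
instance (n : Int) (batteries : List Int) (out : Int) : Decidable (Spec_maxRunTime_bin_search n batteries out) := by unfold Spec_maxRunTime_bin_search; infer_instance

-- ===== CLAIM (what is proved, stated in full; the proofs are below) =====
def Claim_equal_maxRunTime_bin_search : Prop := ∀ (n : Int) (batteries : List Int), Dom_maxRunTime_bin_search n batteries → Pre_maxRunTime_bin_search n batteries → Spec_maxRunTime_bin_search n batteries (maxRunTime_bin_search n batteries)

-- ===== LEMMAS AND PROOFS =====

-- abbreviation for A's capped sum (proof-side only)
def pvSumMin (t : Int) (l : List Int) : Int := l.foldl (fun a c => a + min t c) 0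

theorem pvFoldMin_eq (t : Int) (l : List Int) (a : Int) :
    l.foldl (fun a c => a + min t c) a = a + (l.map (fun c => min t c)).sum := by
  induction l generalizing a with
  | nil => simp
  | cons c r ih => simp [List.foldl_cons, ih]; ring

theorem pvFoldAdd_eq (l : List Int) (a : Int) : l.foldl (· + ·) a = a + l.sum := by
  induction l generalizing a with
  | nil => simp
  | cons c r ih => simp [List.foldl_cons, ih]; ring

-- k = countP (· < t) splits a sorted list: index i is < t iff i < k
theorem pvCount_split (t : Int) (bs : List Int) (hs : bs.Pairwise (· ≤ ·))
    (i : Nat) (hi : i < bs.length) :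
    (bs[i] < t ↔ i < bs.countP (fun c => decide (c < t))) := by
  induction bs generalizing i with
  | nil => simp at hi
  | cons a l ih =>
    have hs' := (List.pairwise_cons.mp hs).2
    have hall := (List.pairwise_cons.mp hs).1
    by_cases ha : a < t
    · have hc : (a :: l).countP (fun c => decide (c < t)) =
          l.countP (fun c => decide (c < t)) + 1 := by
        simp [ha]
      cases i with
      | zero => simpa [hc] using ha
      | succ j =>
        simp only [List.getElem_cons_succ, hc]
        rw [ih hs' j (by simpa using hi)]
        omega
    · have hl0 : l.countP (fun c => decide (c < t)) = 0 := by
        rw [List.countP_eq_zero]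
        intro c hc
        simp only [decide_eq_true_eq]
        have := hall c hc
        omega
      have hc : (a :: l).countP (fun c => decide (c < t)) = 0 := by
        simp [ha, hl0]
      cases i with
      | zero => simpa [hc] using ha
      | succ j =>
        simp only [List.getElem_cons_succ, hc]
        constructor
        · intro h
          have hj : j < l.length := by simpa using hi
          have := hall (l[j]'hj) (List.getElem_mem _)
          omega
        · omega

-- the hand-rolled bisect returns countP (· < t) on a sorted list
theorem pvBisect_eq (t : Int) (bs : List Int) (hs : bs.Pairwise (· ≤ ·)) :
    ∀ d lo hi, hi - lo ≤ d → lo ≤ bs.countP (fun c => decide (c < t)) →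
      bs.countP (fun c => decide (c < t)) ≤ hi → hi ≤ bs.length →
      pvBisect bs t lo hi = bs.countP (fun c => decide (c < t)) := by
  intro d
  induction d with
  | zero =>
    intro lo hi hd h1 h2 h3
    rw [pvBisect]
    have : ¬ lo < hi := by omega
    simp [this]; omega
  | succ d ih =>
    intro lo hi hd h1 h2 h3
    rw [pvBisect]
    by_cases h : lo < hi
    · simp only [h, dif_pos]
      have hmid : (lo + hi) / 2 < bs.length := by omega
      have hget : bs.getD ((lo + hi) / 2) 0 = bs[(lo + hi) / 2] := by
        rw [List.getD_eq_getElem?_getD, List.getElem?_eq_getElem hmid]; rfl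
      rw [hget]
      have hsplit := pvCount_split t bs hs ((lo + hi) / 2) hmid
      by_cases hlt : bs[(lo + hi) / 2] < t
      · have hk : (lo + hi) / 2 < bs.countP (fun c => decide (c < t)) := hsplit.mp hlt
        simp only [hlt, if_pos]
        exact ih _ _ (by omega) (by omega) h2 h3
      · have hk : ¬ ((lo + hi) / 2 < bs.countP (fun c => decide (c < t))) :=
          fun hc => hlt (hsplit.mpr hc)
        simp only [hlt, if_false]
        exact ih _ _ (by omega) h1 (by omega) (by omega)
    · simp [h]; omega

-- prefix-sum list: characterization of the fold that builds (s, pref)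
def pvPrefs (s : Int) : List Int → List Int
  | [] => []
  | c :: r => (s + c) :: pvPrefs (s + c) r

theorem pvFoldSP (l : List Int) (s0 : Int) (p0 : List Int) :
    l.foldl (fun (acc : Int × List Int) c => (acc.1 + c, acc.2 ++ [acc.1 + c])) (s0, p0)
      = (s0 + l.sum, p0 ++ pvPrefs s0 l) := by
  induction l generalizing s0 p0 with
  | nil => simp [pvPrefs]
  | cons c r ih =>
    simp only [List.foldl_cons, ih, pvPrefs, List.sum_cons, List.append_assoc,
      List.singleton_append, Prod.mk.injEq]
    exact ⟨by ring, trivial⟩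

theorem pvPrefs_getD (l : List Int) : ∀ (k : Nat) (s : Int), k < l.length →
    (pvPrefs s l).getD k 0 = s + (l.take (k + 1)).sum := by
  induction l with
  | nil => intro k s h; simp at h
  | cons c r ih =>
    intro k s h
    cases k with
    | zero => simp [pvPrefs]
    | succ j =>
      simp only [pvPrefs, List.getD_cons_succ, List.take_succ_cons, List.sum_cons]
      rw [ih j (s + c) (by simpa using h)]
      ring

theorem pvPref_getD (l : List Int) (k : Nat) (hk : k ≤ l.length) :
    (([0] ++ pvPrefs 0 l) : List Int).getD k 0 = (l.take k).sum := by
  cases k with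
  | zero => simp
  | succ j =>
    simp only [List.cons_append, List.nil_append, List.getD_cons_succ]
    rw [pvPrefs_getD l j 0 (by omega)]
    simp

-- capped sum via the split at k = countP (· < t)
theorem pvCappedSum_split (t : Int) (bs : List Int) (hs : bs.Pairwise (· ≤ ·)) :
    (bs.take (bs.countP (fun c => decide (c < t)))).sum
      + t * ((bs.length : Int) - (bs.countP (fun c => decide (c < t)) : Int))
      = pvSumMin t bs := by
  set k := bs.countP (fun c => decide (c < t)) with hk
  have hkle : k ≤ bs.length := List.countP_le_length
  rw [pvSumMin, pvFoldMin_eq, zero_add]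
  have hdecomp : bs.map (fun c => min t c) =
      (bs.take k).map (fun c => min t c) ++ (bs.drop k).map (fun c => min t c) := by
    rw [← List.map_append, List.take_append_drop]
  have htake : (bs.take k).map (fun c => min t c) = bs.take k := by
    have hcong : ∀ c ∈ bs.take k, min t c = id c := by
      intro c hc
      obtain ⟨i, hilen, hival⟩ := List.mem_iff_getElem.mp hc
      have hilt : i < k := by simp at hilen; omega
      have hbc : bs[i]'(by omega) = c := by
        rw [← hival]; exact (List.getElem_take).symm
      have hlt : c < t := by
        rw [← hbc]; exact (pvCount_split t bs hs i (by omega)).mpr (by rw [← hk]; omega)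
      simp [min_eq_right (le_of_lt hlt)]
    rw [List.map_congr_left hcong, List.map_id]
  have hdrop : (bs.drop k).map (fun c => min t c) = List.replicate (bs.length - k) t := by
    apply List.eq_replicate_iff.mpr
    constructor
    · simp
    · intro b hb
      obtain ⟨c, hc, hcb⟩ := List.mem_map.mp hb
      obtain ⟨i, hilen, hival⟩ := List.mem_iff_getElem.mp hc
      have hlen : (bs.drop k).length = bs.length - k := by simp
      have hbc : bs[k + i]'(by omega) = c := by
        rw [← hival]; exact (List.getElem_drop).symm
      have hge : ¬ c < t := by
        rw [← hbc]
        intro hcon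
        have := (pvCount_split t bs hs (k + i) (by omega)).mp hcon
        omega
      have htc : t ≤ c := not_lt.mp hge
      rw [← hcb, min_eq_left htc]
  rw [hdecomp, List.sum_append, htake, hdrop, List.sum_replicate]
  have : (bs.length - k) • t = ((bs.length : Int) - (k : Int)) * t := by
    rw [nsmul_eq_mul]
    push_cast [Nat.cast_sub hkle]
    ring
  rw [this]; ring

-- B's capped = A's capped sum over the original list
theorem pvCapped_eq (t : Int) (batteries : List Int) :
    pvCapped (PySem.List.sorted batteries (fun x => x) false)
      ([0] ++ pvPrefs 0 (PySem.List.sorted batteries (fun x => x) false))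
      (PySem.List.sorted batteries (fun x => x) false).length t
      = pvSumMin t batteries := by
  set bs := PySem.List.sorted batteries (fun x => x) false with hbs
  have hperm : bs.Perm batteries := PySem.List.sorted_perm ..
  have hs : bs.Pairwise (· ≤ ·) := by
    have := PySem.List.sorted_pairwise (xs := batteries) (key := fun x => x)
    simpa [hbs] using this
  have hsum : pvSumMin t bs = pvSumMin t batteries := by
    rw [pvSumMin, pvSumMin, pvFoldMin_eq, pvFoldMin_eq]
    congr 1
    exact List.Perm.sum_eq (List.Perm.map _ hperm)
  rw [pvCapped]
  have hb := pvBisect_eq t bs hs bs.length 0 bs.length (by omega) (by omega)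
      List.countP_le_length (le_refl _)
  simp only [hb]
  rw [pvPref_getD bs _ List.countP_le_length]
  rw [pvCappedSum_split t bs hs, hsum]

-- the two binary-search loops agree (their predicates are pointwise equal)
theorem pvLoop_eq (n : Int) (batteries : List Int) :
    ∀ d lo hi, (hi - lo).toNat ≤ d →
      pvLoopA n batteries lo hi
        = pvLoopB n (PySem.List.sorted batteries (fun x => x) false)
            ([0] ++ pvPrefs 0 (PySem.List.sorted batteries (fun x => x) false))
            (PySem.List.sorted batteries (fun x => x) false).length lo hi := by
  intro d
  induction d with
  | zero =>
    intro lo hi hd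
    have h : ¬ lo < hi := by omega
    rw [pvLoopA, pvLoopB]
    simp [h]
  | succ d ih =>
    intro lo hi hd
    rw [pvLoopA, pvLoopB]
    by_cases h : lo < hi
    · simp only [h, dif_pos]
      have hmb := pvMidBounds lo hi h
      rw [pvCapped_eq]
      simp only [pvSumMin]
      by_cases hp : PySem.Int.floordiv (lo + hi) 2 ≤
          PySem.Int.floordiv
            (List.foldl (fun a c => a + min (PySem.Int.floordiv (lo + hi) 2) c) 0 batteries) n
      · simp only [hp, if_pos]
        refine ih _ _ ?_
        omega
      · simp only [hp, if_false]
        refine ih _ _ ?_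
        omega
    · simp [h]

-- ===== VERDICT (by name: the statement is the Claim_ definition above) =====
theorem maxRunTime_bin_search_spec : Claim_equal_maxRunTime_bin_search := by
  intro n batteries _hdom _hpre
  unfold Spec_maxRunTime_bin_search maxRunTime_bin_search maxRunTime_bin_search_alt
  by_cases hn : n = (batteries.length : Int)
  · simp [hn]
  · simp only [hn, if_false]
    set bs := PySem.List.sorted batteries (fun x => x) false with hbs
    have hsp := pvFoldSP bs 0 [0]
    simp only [hsp, zero_add]
    have hsum : bs.sum = batteries.sum := List.Perm.sum_eq (PySem.List.sorted_perm ..)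
    have hfold : batteries.foldl (· + ·) 0 = bs.sum := by
      rw [pvFoldAdd_eq, hsum, zero_add]
    rw [hfold]
    exact pvLoop_eq n batteries _ 1 (PySem.Int.floordiv bs.sum n + 1) (le_refl _)
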